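-- pv_equiv track=rewrite | github.com/thezulux24/Data_Structure | hw1finished.py | sumarValoresMatriz
-- ===== SOURCE A (Python) =====
-- def sumarValoresMatriz (matriz, tupla):
-- 	suma = 0
-- 	for fila, columna in tupla: ##fila corresponde al primer valor de la tupla y columna al segundo
-- 		if fila in matriz:  ##si la fila(primer valor de la tupla) se encuentra en la matriz:
-- 			for y, valor in matriz[fila]: #y adopará el primer valor de la tupla *dentro de la matriz* dispersa correspondiente a la ubicacion
--                                 #"valor" correspondiente al valor (ESTE ES EL QUE SE SUMARÁ AL CONTADOR)
-- 				if columna == y: ##se recorrerá en ciclo buscando la coincidencia de columna para determinar que se encuentra la ubicacion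
--                                 #de ser así, se sumará al contador el correspondiente a la coordenada de la matriz dispersa que en nuestro caso se llama "valor"
-- 					suma += valor
-- 	return suma
-- ===== SOURCE B (Python) =====
-- def sumarValoresMatriz(matriz, tupla):
--     # Build a multiplicity index of the queries once, then sweep the matrix data.
--     counts = {}
--     for fila, columna in tupla:
--         counts[(fila, columna)] = counts.get((fila, columna), 0) + 1
--     suma = 0
--     for fila, entradas in matriz.items():
--         for y, valor in entradas:
--             suma += valor * counts.get((fila, y), 0)
--     return suma
-- ===== Notes on version B (the rewrite author's own statement) =====
-- stated objective: alternative
-- what changed: B inverts the traversal: it builds a dict counting how often each (fila, columna) pair is queried, then loops once over the matrix entries adding valor * count, instead of scanning the row list for every query.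
import Mathlib
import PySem

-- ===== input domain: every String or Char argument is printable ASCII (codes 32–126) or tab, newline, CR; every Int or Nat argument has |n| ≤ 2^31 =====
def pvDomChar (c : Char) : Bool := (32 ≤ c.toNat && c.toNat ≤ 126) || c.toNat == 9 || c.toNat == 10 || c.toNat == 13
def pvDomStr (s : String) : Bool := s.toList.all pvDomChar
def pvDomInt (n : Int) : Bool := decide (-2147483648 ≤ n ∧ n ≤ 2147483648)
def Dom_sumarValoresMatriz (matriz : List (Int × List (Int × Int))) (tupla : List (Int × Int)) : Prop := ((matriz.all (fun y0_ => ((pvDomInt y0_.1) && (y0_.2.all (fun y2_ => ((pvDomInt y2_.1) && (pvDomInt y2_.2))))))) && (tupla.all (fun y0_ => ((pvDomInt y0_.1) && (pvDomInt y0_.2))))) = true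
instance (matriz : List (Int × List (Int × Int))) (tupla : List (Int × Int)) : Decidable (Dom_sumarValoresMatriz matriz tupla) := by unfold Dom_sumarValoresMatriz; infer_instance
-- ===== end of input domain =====

-- B sweeps the matrix entries against a query-multiplicity dict instead of scanning a row per query (alternative decomposition; same results).

-- ===== PORT A =====
-- for each query: if the row key is in the dict, scan the row list for matching columns, adding their values
def sumarValoresMatriz (matriz : List (Int × List (Int × Int))) (tupla : List (Int × Int)) : Int :=
  tupla.foldl (fun suma q =>
    match (PySem.Dict.mk matriz).get? q.1 with
    | none => suma
    | some row => row.foldl (fun s p => if q.2 == p.1 then s + p.2 else s) suma) 0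

-- ===== PORT B =====
-- counts[(fila, columna)] = counts.get((fila, columna), 0) + 1  over tupla
def sumarValoresMatrizCounts (tupla : List (Int × Int)) : PySem.Dict (Int × Int) Int :=
  tupla.foldl (fun d q => d.insert q (d.getD q 0 + 1)) PySem.Dict.empty

-- the second loop of B: sweep every matrix entry, adding valor * multiplicity of its coordinate
def sumarValoresMatrizSweep (matriz : List (Int × List (Int × Int))) (counts : PySem.Dict (Int × Int) Int) : Int :=
  matriz.foldl (fun s r =>
    r.2.foldl (fun s2 p => s2 + p.2 * counts.getD (r.1, p.1) 0) s) 0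

def sumarValoresMatriz_alt (matriz : List (Int × List (Int × Int))) (tupla : List (Int × Int)) : Int :=
  sumarValoresMatrizSweep matriz (sumarValoresMatrizCounts tupla)

-- ===== PRECONDITION & SPEC =====
-- Pre_ requires the row keys of matriz to be distinct: matriz stands for a Python dict, whose keys
-- are necessarily unique, so no Python input is excluded; on duplicate-key association lists A's
-- first-match lookup and B's full sweep are both accidental.
def Pre_sumarValoresMatriz (matriz : List (Int × List (Int × Int))) (_tupla : List (Int × Int)) : Prop :=
  (matriz.map Prod.fst).Nodup
instance (matriz : List (Int × List (Int × Int))) (tupla : List (Int × Int)) : Decidable (Pre_sumarValoresMatriz matriz tupla) := by unfold Pre_sumarValoresMatriz; infer_instance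

def pvWitness_sumarValoresMatriz : (List (Int × List (Int × Int))) × (List (Int × Int)) :=
  ([(1, [(2, 5), (3, 7)]), (4, [(2, 9)])], [(1, 3), (1, 3), (4, 2)])

def Spec_sumarValoresMatriz (matriz : List (Int × List (Int × Int))) (tupla : List (Int × Int)) (out : Int) : Prop := out = sumarValoresMatriz_alt matriz tupla
instance (matriz : List (Int × List (Int × Int))) (tupla : List (Int × Int)) (out : Int) : Decidable (Spec_sumarValoresMatriz matriz tupla out) := by unfold Spec_sumarValoresMatriz; infer_instance

-- ===== CLAIM (what is proved, stated in full; the proofs are below) =====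
def Claim_equal_sumarValoresMatriz : Prop := ∀ (matriz : List (Int × List (Int × Int))) (tupla : List (Int × Int)), Dom_sumarValoresMatriz matriz tupla → Pre_sumarValoresMatriz matriz tupla → Spec_sumarValoresMatriz matriz tupla (sumarValoresMatriz matriz tupla)

-- ===== LEMMAS AND PROOFS =====

-- value A adds for one query q
def svQuery (matriz : List (Int × List (Int × Int))) (q : Int × Int) : Int :=
  match (PySem.Dict.mk matriz).get? q.1 with
  | none => 0
  | some row => (row.map (fun p => if q.2 = p.1 then p.2 else 0)).sum

-- total of matrix entries whose coordinate equals k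
def svWeight (matriz : List (Int × List (Int × Int))) (k : Int × Int) : Int :=
  (matriz.map (fun r => (r.2.map (fun p => if (r.1, p.1) = k then p.2 else 0)).sum)).sum

theorem svRow_foldl (row : List (Int × Int)) (c s : Int) :
    row.foldl (fun s p => if c == p.1 then s + p.2 else s) s
      = s + (row.map (fun p => if c = p.1 then p.2 else 0)).sum := by
  induction row generalizing s with
  | nil => simp
  | cons p rest ih =>
    simp only [List.foldl_cons]
    rw [ih]
    simp only [List.map_cons, List.sum_cons]
    by_cases h : c = p.1
    · simp only [h, beq_self_eq_true, if_true]; ring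
    · simp [h]

theorem svA_foldl (matriz : List (Int × List (Int × Int))) (tupla : List (Int × Int)) (s : Int) :
    tupla.foldl (fun suma q =>
      match (PySem.Dict.mk matriz).get? q.1 with
      | none => suma
      | some row => row.foldl (fun s p => if q.2 == p.1 then s + p.2 else s) suma) s
      = s + (tupla.map (svQuery matriz)).sum := by
  induction tupla generalizing s with
  | nil => simp
  | cons q rest ih =>
    simp only [List.foldl_cons]
    rw [ih]
    simp only [List.map_cons, List.sum_cons]
    unfold svQuery
    cases h : (PySem.Dict.mk matriz).get? q.1 with
    | none => dsimp only; ring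
    | some row => dsimp only; rw [svRow_foldl]; ring

theorem svCounts_getD (tupla : List (Int × Int)) (d : PySem.Dict (Int × Int) Int) (k : Int × Int) :
    (tupla.foldl (fun d q => d.insert q (d.getD q 0 + 1)) d).getD k 0
      = d.getD k 0 + tupla.count k := by
  induction tupla generalizing d with
  | nil => simp
  | cons q rest ih =>
    simp only [List.foldl_cons]
    rw [ih]
    rw [PySem.Dict.getD_insert]
    by_cases h : k = q
    · subst h; simp; ring
    · simp [h, Ne.symm h]

theorem svB_foldl (matriz : List (Int × List (Int × Int))) (counts : PySem.Dict (Int × Int) Int) :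
    sumarValoresMatrizSweep matriz counts
      = (matriz.map (fun r => (r.2.map (fun p => p.2 * counts.getD (r.1, p.1) 0)).sum)).sum := by
  unfold sumarValoresMatrizSweep
  simp only [PySem.List.foldl_add]
  induction matriz with
  | nil => simp
  | cons r rest ih => simp only [List.map_cons, List.sum_cons]; rw [← ih]; simp

-- one extra query q adds svWeight matriz q to B's sweep total
theorem svStep (matriz : List (Int × List (Int × Int))) (q : Int × Int) (c : (Int × Int) → Int) :
    (matriz.map (fun r => (r.2.map (fun p => p.2 * (c (r.1, p.1) + if q = (r.1, p.1) then 1 else 0))).sum)).sum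
      = (matriz.map (fun r => (r.2.map (fun p => p.2 * c (r.1, p.1))).sum)).sum + svWeight matriz q := by
  unfold svWeight
  rw [← PySem.List.sum_map_add_int]
  apply congrArg
  apply List.map_congr_left
  intro r _
  rw [← PySem.List.sum_map_add_int]
  apply congrArg
  apply List.map_congr_left
  intro p _
  by_cases h : q = (r.1, p.1)
  · simp [h, eq_comm]; ring
  · simp [h, eq_comm]

-- Σ over matrix entries of value·count = Σ over queries of svWeight
theorem svExchange (matriz : List (Int × List (Int × Int))) (tupla : List (Int × Int)) :
    (matriz.map (fun r => (r.2.map (fun p => p.2 * (tupla.count (r.1, p.1) : Int))).sum)).sum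
      = (tupla.map (svWeight matriz)).sum := by
  induction tupla with
  | nil => simp
  | cons q rest ih =>
    simp only [List.map_cons, List.sum_cons, List.count_cons, beq_iff_eq]
    push_cast
    rw [svStep matriz q (fun k => (rest.count k : Int))]
    rw [ih]
    ring

-- with distinct row keys the weight of a coordinate is exactly A's per-query value
theorem svWeight_eq_svQuery (matriz : List (Int × List (Int × Int)))
    (hnd : (matriz.map Prod.fst).Nodup) (q : Int × Int) :
    svWeight matriz q = svQuery matriz q := by
  induction matriz with
  | nil => simp [svWeight, svQuery, PySem.Dict.get?]
  | cons r rest ih =>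
    obtain ⟨f, row⟩ := r
    simp only [List.map_cons, List.nodup_cons] at hnd
    obtain ⟨hf, hrest⟩ := hnd
    unfold svWeight svQuery
    simp only [List.map_cons, List.sum_cons, PySem.Dict.get?_mk_cons]
    by_cases hq : f = q.1
    · subst hq
      simp only [beq_self_eq_true, if_true]
      have hzero : (rest.map (fun r' => ((r'.2.map (fun p => if (r'.1, p.1) = q then p.2 else 0)).sum))).sum = 0 := by
        apply List.sum_eq_zero
        intro x hx
        obtain ⟨r', hr', rfl⟩ := List.mem_map.mp hx
        apply List.sum_eq_zero
        intro y hy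
        obtain ⟨p, hp, rfl⟩ := List.mem_map.mp hy
        have hne : r'.1 ≠ q.1 := fun h => hf (List.mem_map.mpr ⟨r', hr', h⟩)
        simp [Prod.ext_iff, hne]
      rw [hzero, add_zero]
      apply congrArg
      apply List.map_congr_left
      intro p _
      have : ((q.1, p.1) = q) ↔ (q.2 = p.1) := by
        constructor
        · intro h; rw [← h]
        · intro h; rw [Prod.ext_iff]; exact ⟨rfl, h.symm⟩
      simp only [this]
    · have hb : (f == q.1) = false := by simp [hq]
      simp only [hb, Bool.false_eq_true, if_false]
      have hhead : ((row.map (fun p => if (f, p.1) = q then p.2 else 0)).sum) = 0 := by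
        apply List.sum_eq_zero
        intro y hy
        obtain ⟨p, hp, rfl⟩ := List.mem_map.mp hy
        simp [Prod.ext_iff, hq]
      rw [hhead, zero_add]
      have := ih hrest
      unfold svWeight svQuery at this
      exact this

-- ===== VERDICT (by name: the statement is the Claim_ definition above) =====
theorem sumarValoresMatriz_spec : Claim_equal_sumarValoresMatriz := by
  intro matriz tupla _ hpre
  unfold Spec_sumarValoresMatriz sumarValoresMatriz sumarValoresMatriz_alt
  rw [svA_foldl, svB_foldl]
  unfold sumarValoresMatrizCounts
  simp only [svCounts_getD, PySem.Dict.getD_empty, zero_add]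
  rw [svExchange]
  exact (congrArg List.sum (List.map_congr_left (fun q _ => svWeight_eq_svQuery matriz hpre q))).symm
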